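-- pv_equiv track=rewrite | github.com/KaritSookpreedee/data-compression | LZ77.py | find_best_sol
-- ===== SOURCE A (Python) =====
-- def find_best_sol(best_sol):
--     repeat_list = []
--     for e in best_sol:
--         repeat_list.append(e[1])
--     repeat_max = max(repeat_list)
--     wanted_index = []
--     for e in best_sol:
--         if e[1] == repeat_max:
--             wanted_index.append(e[0])
--     wanted_LZ77_index = min(wanted_index)
--     for e in best_sol:
--         if e[0] == min(wanted_index) and e[1] == repeat_max:
--             next_char_index = e[2]
--     return (wanted_LZ77_index, repeat_max, next_char_index)
-- ===== SOURCE B (Python) =====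
-- def find_best_sol(best_sol):
--     best = None
--     for e in best_sol:
--         if best is None or e[1] > best[1] or (e[1] == best[1] and e[0] <= best[0]):
--             best = e
--     if best is None:
--         raise ValueError("find_best_sol() arg is an empty sequence")
--     return (best[0], best[1], best[2])
-- ===== Notes on version B (the rewrite author's own statement) =====
-- stated objective: simpler
-- what changed: Replaces A's three list passes plus max()/min() over auxiliary lists by a single loop keeping the current best tuple under the key (repeat descending, index ascending), replacing on exact ties to preserve A's last-wins next_char_index.
import Mathlib
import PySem

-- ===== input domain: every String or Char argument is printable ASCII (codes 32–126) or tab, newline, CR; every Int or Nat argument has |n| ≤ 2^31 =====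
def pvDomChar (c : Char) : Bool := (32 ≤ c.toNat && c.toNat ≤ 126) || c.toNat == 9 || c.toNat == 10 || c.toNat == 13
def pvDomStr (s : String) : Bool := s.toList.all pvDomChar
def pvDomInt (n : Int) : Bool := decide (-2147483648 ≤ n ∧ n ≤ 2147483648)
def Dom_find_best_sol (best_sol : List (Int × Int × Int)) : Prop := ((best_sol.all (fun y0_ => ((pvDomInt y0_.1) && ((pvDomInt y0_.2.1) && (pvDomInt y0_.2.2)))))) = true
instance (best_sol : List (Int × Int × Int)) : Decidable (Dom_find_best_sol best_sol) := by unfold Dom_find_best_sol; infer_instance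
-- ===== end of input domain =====

-- B replaces A's three passes and auxiliary lists by one loop maintaining the running
-- best tuple (key: repeat descending, index ascending, last-wins on exact ties): simpler.

-- ===== PORT A =====
def find_best_sol (best_sol : List (Int × Int × Int)) : Int × Int × Int :=
  let repeat_list := best_sol.foldl (fun acc e => acc ++ [e.2.1]) []
  match PySem.List.max? repeat_list (fun y => y) with
  | none => (0, 0, 0)   -- Python: max([]) raises ValueError; excluded by Pre_
  | some repeat_max =>
    let wanted_index := best_sol.foldl (fun acc e => if e.2.1 == repeat_max then acc ++ [e.1] else acc) []
    match PySem.List.min? wanted_index (fun y => y) with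
    | none => (0, 0, 0)   -- unreachable: repeat_max is attained, so wanted_index ≠ []
    | some wanted_LZ77_index =>
      let next_char_index := best_sol.foldl
        (fun acc e => if e.1 == wanted_LZ77_index && e.2.1 == repeat_max then some e.2.2 else acc)
        (none : Option Int)
      (wanted_LZ77_index, repeat_max, next_char_index.getD 0)

-- ===== PORT B =====
-- the body of B's loop: replace the running best when e is strictly better or ties exactly
def fbsStep (acc : Option (Int × Int × Int)) (e : Int × Int × Int) : Option (Int × Int × Int) :=
  match acc with
  | none => some e
  | some b => if e.2.1 > b.2.1 ∨ (e.2.1 = b.2.1 ∧ e.1 ≤ b.1) then some e else some b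

def find_best_sol_alt (best_sol : List (Int × Int × Int)) : Int × Int × Int :=
  match best_sol.foldl fbsStep none with
  | none => (0, 0, 0)   -- Python B: raise ValueError; excluded by Pre_
  | some best => (best.1, best.2.1, best.2.2)

-- ===== PRECONDITION & SPEC =====
-- A raises ValueError (max of an empty sequence) on the empty list, and so does B: excluded.
def Pre_find_best_sol (best_sol : List (Int × Int × Int)) : Prop := best_sol ≠ []
instance (best_sol : List (Int × Int × Int)) : Decidable (Pre_find_best_sol best_sol) := by
  unfold Pre_find_best_sol; infer_instance

def pvWitness_find_best_sol : (List (Int × Int × Int)) := [(0, 2, 5), (1, 2, 7)]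

def Spec_find_best_sol (best_sol : List (Int × Int × Int)) (out : Int × Int × Int) : Prop := out = find_best_sol_alt best_sol
instance (best_sol : List (Int × Int × Int)) (out : Int × Int × Int) : Decidable (Spec_find_best_sol best_sol out) := by unfold Spec_find_best_sol; infer_instance

-- ===== CLAIM (what is proved, stated in full; the proofs are below) =====
def Claim_equal_find_best_sol : Prop := ∀ (best_sol : List (Int × Int × Int)), Dom_find_best_sol best_sol → Pre_find_best_sol best_sol → Spec_find_best_sol best_sol (find_best_sol best_sol)

-- ===== LEMMAS AND PROOFS =====

-- the three loops of A, named so they can be reasoned about separately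
def repsOf (l : List (Int × Int × Int)) : List Int :=
  l.foldl (fun acc e => acc ++ [e.2.1]) []

def wantedOf (l : List (Int × Int × Int)) (m : Int) : List Int :=
  l.foldl (fun acc e => if e.2.1 == m then acc ++ [e.1] else acc) []

def nciOf (l : List (Int × Int × Int)) (w m : Int) : Option Int :=
  l.foldl (fun acc e => if e.1 == w && e.2.1 == m then some e.2.2 else acc) none

lemma A_eq (l : List (Int × Int × Int)) :
    find_best_sol l =
      match PySem.List.max? (repsOf l) (fun y => y) with
      | none => (0, 0, 0)
      | some m =>
        match PySem.List.min? (wantedOf l m) (fun y => y) with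
        | none => (0, 0, 0)
        | some w => (w, m, (nciOf l w m).getD 0) := rfl

lemma repsOf_eq_map (l : List (Int × Int × Int)) : repsOf l = l.map (fun e => e.2.1) := by
  unfold repsOf
  simpa using PySem.List.foldl_append_singleton_eq_map (fun e => e.2.1) l []

lemma wantedOf_eq (l : List (Int × Int × Int)) (m : Int) :
    wantedOf l m = (l.filter (fun e => e.2.1 == m)).map (fun e => e.1) := by
  unfold wantedOf
  simpa using PySem.List.foldl_append_if (fun e => e.2.1 == m) (fun e => e.1) l []

lemma repsOf_snoc (l : List (Int × Int × Int)) (e : Int × Int × Int) :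
    repsOf (l ++ [e]) = repsOf l ++ [e.2.1] := by
  simp [repsOf_eq_map]

lemma nciOf_snoc (l : List (Int × Int × Int)) (e : Int × Int × Int) (w m : Int) :
    nciOf (l ++ [e]) w m =
      if e.1 == w && e.2.1 == m then some e.2.2 else nciOf l w m := by
  simp [nciOf, List.foldl_append]

lemma max?_id_snoc (xs : List Int) (x : Int) :
    PySem.List.max? (xs ++ [x]) (fun y => y) =
      some (match PySem.List.max? xs (fun y => y) with | none => x | some m => max m x) := by
  cases xs with
  | nil => rw [List.nil_append, PySem.List.max?_id_cons]; rfl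
  | cons a t =>
      rw [List.cons_append, PySem.List.max?_id_cons, PySem.List.max?_id_cons, List.foldl_append]
      simp

lemma min?_id_snoc (xs : List Int) (x : Int) :
    PySem.List.min? (xs ++ [x]) (fun y => y) =
      some (match PySem.List.min? xs (fun y => y) with | none => x | some m => min m x) := by
  cases xs with
  | nil => rw [List.nil_append, PySem.List.min?_id_cons]; rfl
  | cons a t =>
      rw [List.cons_append, PySem.List.min?_id_cons, PySem.List.min?_id_cons, List.foldl_append]
      simp

lemma A_snoc (l : List (Int × Int × Int)) (e : Int × Int × Int) (h : l ≠ []) :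
    find_best_sol (l ++ [e]) =
      if e.2.1 > (find_best_sol l).2.1 ∨
         (e.2.1 = (find_best_sol l).2.1 ∧ e.1 ≤ (find_best_sol l).1)
      then e else find_best_sol l := by
  obtain ⟨m, hm⟩ : ∃ m, PySem.List.max? (repsOf l) (fun y => y) = some m := by
    rcases hcase : PySem.List.max? (repsOf l) (fun y => y) with _ | m
    · exfalso
      have h0 := (PySem.List.max?_eq_none_iff _ _).1 hcase
      rw [repsOf_eq_map] at h0
      simp only [List.map_eq_nil_iff] at h0
      exact h h0
    · exact ⟨m, rfl⟩
  have hmax : ∀ x ∈ l, x.2.1 ≤ m := by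
    intro x hx
    have hmem : x.2.1 ∈ repsOf l := by
      rw [repsOf_eq_map]; exact List.mem_map_of_mem hx
    exact PySem.List.max?_isMax hm _ hmem
  have hmattain : ∃ x ∈ l, x.2.1 = m := by
    have h1 := PySem.List.max?_mem hm
    rw [repsOf_eq_map] at h1
    simpa using h1
  obtain ⟨w, hw⟩ : ∃ w, PySem.List.min? (wantedOf l m) (fun y => y) = some w := by
    rcases hcase : PySem.List.min? (wantedOf l m) (fun y => y) with _ | w
    · exfalso
      have h0 := (PySem.List.min?_eq_none_iff _ _).1 hcase
      rw [wantedOf_eq] at h0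
      obtain ⟨x, hx, hxm⟩ := hmattain
      simp only [List.map_eq_nil_iff, List.filter_eq_nil_iff] at h0
      exact h0 x hx (by simp [hxm])
    · exact ⟨w, rfl⟩
  have hwmin : ∀ i ∈ wantedOf l m, w ≤ i := fun i hi => PySem.List.min?_isMin hw _ hi
  have hAl : find_best_sol l = (w, m, (nciOf l w m).getD 0) := by
    simp only [A_eq l, hm, hw]
  have hmax2 : PySem.List.max? (repsOf (l ++ [e])) (fun y => y) = some (max m e.2.1) := by
    rw [repsOf_snoc, max?_id_snoc, hm]
  rw [hAl]
  rcases lt_trichotomy m e.2.1 with hgt | heq | hlt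
  · -- e has strictly larger repeat: e wins everywhere
    have hmaxv : max m e.2.1 = e.2.1 := max_eq_right hgt.le
    have hfilter : l.filter (fun x => x.2.1 == e.2.1) = [] := by
      rw [List.filter_eq_nil_iff]
      intro x hx
      simp only [beq_iff_eq]
      exact fun hc => absurd (hc ▸ hmax x hx) (not_le.2 hgt)
    have hw2 : wantedOf (l ++ [e]) e.2.1 = [e.1] := by
      rw [wantedOf_eq, List.filter_append, hfilter]
      simp
    have hmin2 : PySem.List.min? ([e.1] : List Int) (fun y => y) = some e.1 := by
      rw [PySem.List.min?_id_cons]; rfl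
    have hnci : nciOf (l ++ [e]) e.1 e.2.1 = some e.2.2 := by
      rw [nciOf_snoc]; simp
    simp only [A_eq (l ++ [e]), hmax2, hmaxv, hw2, hmin2, hnci]
    rw [if_pos (Or.inl hgt)]
    rfl
  · -- equal repeat: compare indices, tie replaces
    have hmaxv : max m e.2.1 = m := by rw [← heq, max_self]
    have hw2 : wantedOf (l ++ [e]) m = wantedOf l m ++ [e.1] := by
      rw [wantedOf_eq, List.filter_append, wantedOf_eq]
      simp [← heq]
    have hmin2 : PySem.List.min? (wantedOf (l ++ [e]) m) (fun y => y) = some (min w e.1) := by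
      rw [hw2, min?_id_snoc, hw]
    by_cases hle : e.1 ≤ w
    · have hminv : min w e.1 = e.1 := min_eq_right hle
      have hnci : nciOf (l ++ [e]) e.1 m = some e.2.2 := by
        rw [nciOf_snoc]; simp [← heq]
      simp only [A_eq (l ++ [e]), hmax2, hmaxv, hmin2, hminv, hnci]
      rw [if_pos (Or.inr ⟨heq.symm, hle⟩), heq]
      rfl
    · have hlt' : w < e.1 := not_le.1 hle
      have hminv : min w e.1 = w := min_eq_left hlt'.le
      have hnci : nciOf (l ++ [e]) w m = nciOf l w m := by
        rw [nciOf_snoc]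
        simp [hlt'.ne']
      simp only [A_eq (l ++ [e]), hmax2, hmaxv, hmin2, hminv, hnci]
      rw [if_neg]
      rintro (h1 | ⟨_, h3⟩)
      · exact absurd (heq ▸ h1) (lt_irrefl _)
      · exact hle h3
  · -- e has strictly smaller repeat: nothing changes
    have hmaxv : max m e.2.1 = m := max_eq_left hlt.le
    have hw2 : wantedOf (l ++ [e]) m = wantedOf l m := by
      rw [wantedOf_eq, List.filter_append, wantedOf_eq]
      simp [hlt.ne]
    have hnci : nciOf (l ++ [e]) w m = nciOf l w m := by
      rw [nciOf_snoc]
      simp [hlt.ne]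
    simp only [A_eq (l ++ [e]), hmax2, hmaxv, hw2, hw, hnci]
    rw [if_neg]
    rintro (h1 | ⟨h2, _⟩)
    · exact absurd (lt_trans hlt h1) (lt_irrefl _)
    · exact absurd (h2 ▸ hlt) (lt_irrefl _)

lemma foldB_eq (l : List (Int × Int × Int)) (h : l ≠ []) :
    l.foldl fbsStep none = some (find_best_sol l) := by
  induction l using List.reverseRecOn with
  | nil => exact absurd rfl h
  | append_singleton l e ih =>
    rw [List.foldl_append]
    by_cases hl : l = []
    · subst hl
      have hsingle : find_best_sol [e] = e := by
        have h1 : repsOf [e] = [e.2.1] := rfl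
        have h2 : PySem.List.max? ([e.2.1] : List Int) (fun y => y) = some e.2.1 := by
          rw [PySem.List.max?_id_cons]; rfl
        have h3 : wantedOf [e] e.2.1 = [e.1] := by
          rw [wantedOf_eq]; simp
        have h4 : PySem.List.min? ([e.1] : List Int) (fun y => y) = some e.1 := by
          rw [PySem.List.min?_id_cons]; rfl
        have h5 : nciOf [e] e.1 e.2.1 = some e.2.2 := by
          simp [nciOf]
        simp only [A_eq [e], h1, h2, h3, h4, h5]
        rfl
      simp only [List.nil_append]
      rw [hsingle]
      rfl
    · rw [ih hl]
      have hstep : fbsStep (some (find_best_sol l)) e =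
          some (if e.2.1 > (find_best_sol l).2.1 ∨
                   (e.2.1 = (find_best_sol l).2.1 ∧ e.1 ≤ (find_best_sol l).1)
                then e else find_best_sol l) := by
        simp only [fbsStep]
        split_ifs <;> rfl
      simp only [List.foldl_cons, List.foldl_nil]
      rw [hstep, A_snoc l e hl]

-- ===== VERDICT (by name: the statement is the Claim_ definition above) =====
theorem find_best_sol_spec : Claim_equal_find_best_sol := by
  intro l _ hpre
  unfold Spec_find_best_sol find_best_sol_alt
  rw [foldB_eq l hpre]
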